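-- pv_equiv track=rewrite | github.com/abhi2196/Learn_python | Itertools/scrabble.py | _get_permutations_draw
-- ===== SOURCE A (Python) =====
-- import itertools
--
-- def _get_permutations_draw(draw):
--     """Helper to get all permutations of a draw (list of letters), hint:
--        use itertools.permutations (order of letters matters)"""
--     max_length = len(draw)
--     result = []
--     for i in range(1, max_length + 1):
--         out = itertools.permutations(draw, i)
--         for item in out:
--             result.append(''.join(item).lower())
--     return result
-- ===== SOURCE B (Python) =====
-- def _go(lowered, used, buckets, prefix, depth, n):
--     """DFS: for each unused index j (ascending) append prefix+lowered[j] to the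
--     bucket for this depth and recurse one level deeper while flagging j used."""
--     app = buckets[depth + 1].append
--     deeper = depth + 1 < n
--     for j in range(n):
--         if not used[j]:
--             s = prefix + lowered[j]
--             app(s)
--             if deeper:
--                 used[j] = True
--                 _go(lowered, used, buckets, s, depth + 1, n)
--                 used[j] = False
--
--
-- def _get_permutations_draw(draw):
--     """Single DFS over a used-flag array: one traversal of the permutation tree
--     collects, per length, all permutation strings (letters pre-lowercased) into
--     buckets; buckets concatenated by length reproduce itertools' order."""
--     n = len(draw)
--     lowered = [x.lower() for x in draw]
--     buckets = [[] for _ in range(n + 1)]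
--     used = [False] * n
--     if n:
--         _go(lowered, used, buckets, "", 0, n)
--     result = []
--     for k in range(1, n + 1):
--         result.extend(buckets[k])
--     return result
-- ===== Notes on version B (the rewrite author's own statement) =====
-- stated objective: alternative
-- what changed: Replaces the per-length itertools.permutations calls with a single hand-written DFS over a used-flag array that pre-lowercases the letters once and collects permutation strings into per-length buckets, concatenated at the end; the permutation tree is walked once instead of once per length.
import Mathlib
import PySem

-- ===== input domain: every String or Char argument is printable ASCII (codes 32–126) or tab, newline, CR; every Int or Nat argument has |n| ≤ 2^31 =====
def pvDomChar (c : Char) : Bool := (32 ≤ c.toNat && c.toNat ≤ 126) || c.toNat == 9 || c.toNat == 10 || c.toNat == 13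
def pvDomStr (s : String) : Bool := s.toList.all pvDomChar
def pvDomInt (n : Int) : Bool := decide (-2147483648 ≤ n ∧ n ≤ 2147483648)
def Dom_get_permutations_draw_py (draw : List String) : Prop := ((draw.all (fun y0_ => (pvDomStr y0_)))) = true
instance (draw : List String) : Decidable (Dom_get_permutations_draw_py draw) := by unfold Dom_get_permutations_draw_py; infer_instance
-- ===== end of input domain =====

-- B replaces the per-length itertools.permutations calls with ONE hand-written DFS over a
-- used-flag array, pre-lowercased letters, and per-length buckets (objective: alternative).

-- ===== PORT A =====
-- helper for the contract of itertools.permutations: all ways to pick one element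
-- (in positional order) together with the remaining pool
def pickA (xs : List String) : List (String × List String) :=
  match xs with
  | [] => []
  | x :: rest => (x, rest) :: (pickA rest).map (fun yz => (yz.1, x :: yz.2))

-- exact contract of itertools.permutations(pool, r): r-tuples in index-lexicographic order
def permsA (r : Nat) (xs : List String) : List (List String) :=
  match r with
  | 0 => [[]]
  | n + 1 => (pickA xs).flatMap (fun yz => (permsA n yz.2).map (yz.1 :: ·))

def get_permutations_draw_py (draw : List String) : List String :=
  (PySem.List.pyRange 1 ((draw.length : Int) + 1) 1).foldl
    (fun result i =>
      (permsA i.toNat draw).foldl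
        (fun result item => result ++ [PySem.Str.lower (PySem.Str.join "" item)]) result)
    []

-- ===== PORT B =====
-- the per-length buckets are disjoint lists in Python; a child's in-place appends are,
-- bucket by bucket, a concatenation, so the state update is a pointwise append
def zipAddB (acc contrib : List (List String)) : List (List String) :=
  List.zipWith (· ++ ·) acc contrib

-- go(prefix, depth): the buckets (relative depths 1..fuel, fuel = n - depth) of this subtree;
-- for each unused j in order: append s = prefix + lowered[j] to bucket 1 and recurse (the
-- 'if deeper' guard of Source B is the fuel reaching 0: goB … 0 = [] contributes nothing)
def goB (lowered : List String) (used : List Bool) (pref : String) : Nat → List (List String)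
  | 0 => []
  | f + 1 =>
      (List.range lowered.length).foldl
        (fun acc j =>
          if used.getD j false then acc
          else zipAddB acc
            ([pref ++ lowered.getD j ""] ::
              goB lowered (used.set j true) (pref ++ lowered.getD j "") f))
        (List.replicate (f + 1) [])

def get_permutations_draw_py_alt (draw : List String) : List String :=
  (goB (draw.map PySem.Str.lower) (List.replicate draw.length false) "" draw.length).foldl
    (· ++ ·) []

-- ===== PRECONDITION & SPEC =====
def Spec_get_permutations_draw_py (draw : List String) (out : List String) : Prop := out = get_permutations_draw_py_alt draw
instance (draw : List String) (out : List String) : Decidable (Spec_get_permutations_draw_py draw out) := by unfold Spec_get_permutations_draw_py; infer_instance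

-- ===== CLAIM (what is proved, stated in full; the proofs are below) =====
def Claim_equal_get_permutations_draw_py : Prop := ∀ (draw : List String), Dom_get_permutations_draw_py draw → Spec_get_permutations_draw_py draw (get_permutations_draw_py draw)

-- ===== LEMMAS AND PROOFS =====

-- the sublist of xs at indices whose used-flag is false
def avail : List String → List Bool → List String
  | [], _ => []
  | _ :: _, [] => []
  | x :: xs, u :: us => if u then avail xs us else x :: avail xs us

lemma strExt (s t : String) (h : s.toList = t.toList) : s = t := String.toList_inj.mp h

lemma strJoin_singleton (y : String) : PySem.Str.join "" [y] = y := by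
  apply strExt; simp [PySem.Str.toList_join, PySem.Chars.join_singleton]

lemma strJoin_empty_cons (y : String) (p : List String) :
    PySem.Str.join "" (y :: p) = y ++ PySem.Str.join "" p := by
  apply strExt
  cases p with
  | nil => simp [PySem.Str.toList_join, PySem.Chars.join_singleton, PySem.Chars.join_nil]
  | cons q qs => simp [PySem.Str.toList_join, PySem.Chars.join_cons_cons]

lemma lower_append (s t : String) :
    PySem.Str.lower (s ++ t) = PySem.Str.lower s ++ PySem.Str.lower t := by
  apply strExt; simp [PySem.Str.toList_lower, PySem.Chars.lower]

lemma lower_join (l : List String) :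
    PySem.Str.lower (PySem.Str.join "" l) = PySem.Str.join "" (l.map PySem.Str.lower) := by
  induction l with
  | nil =>
      apply strExt
      simp [PySem.Str.toList_join, PySem.Chars.join_nil, PySem.Str.toList_lower, PySem.Chars.lower]
  | cons x xs ih => rw [strJoin_empty_cons, lower_append, ih, List.map_cons, strJoin_empty_cons]

lemma avail_replicate_false : ∀ (ds : List String), avail ds (List.replicate ds.length false) = ds := by
  intro ds
  induction ds with
  | nil => simp [avail]
  | cons x xs ih => simp [avail, List.replicate_succ, ih]

lemma foldl_app {α β : Type} (f : α → β) :
    ∀ (l : List α) (init : List β),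
      l.foldl (fun acc x => acc ++ [f x]) init = init ++ l.map f := by
  intro l
  induction l with
  | nil => simp
  | cons x xs ih => intro init; simp [ih]

-- the scan over indices skipping used flags = the scan over pickA of the available sublist
lemma scan_eq :
    ∀ (ds : List String) (us : List Bool), us.length = ds.length →
      ∀ (G : String → List String → List String),
      (List.range ds.length).flatMap (fun j =>
          if us.getD j false then []
          else G (ds.getD j "") (avail ds (us.set j true)))
        = (pickA (avail ds us)).flatMap (fun yz => G yz.1 yz.2) := by
  intro ds
  induction ds with
  | nil => intro us h G; simp [avail, pickA]
  | cons x xs ih =>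
      intro us h G
      cases us with
      | nil => simp at h
      | cons u ut =>
          simp only [List.length_cons] at h
          simp only [List.length_cons]
          rw [List.range_succ_eq_map]
          simp only [List.flatMap_cons, List.flatMap_map]
          cases u with
          | true =>
              simp only [List.getD_cons_zero, if_true]
              have := ih ut (Nat.succ_injective h) G
              simpa [avail, Function.comp, List.getD_cons_succ, List.set_cons_succ] using this
          | false =>
              have h2 := ih ut (Nat.succ_injective h) (fun y ys => G y (x :: ys))
              simp only [avail, pickA, List.getD_cons_zero, List.getD_cons_succ,
                List.set_cons_zero, List.set_cons_succ, List.flatMap_cons,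
                List.flatMap_map, Bool.false_eq_true, if_false, if_true] at h2 ⊢
              rw [h2]

lemma pickA_map (f : String → String) :
    ∀ (xs : List String),
      pickA (xs.map f) = (pickA xs).map (fun yz => (f yz.1, yz.2.map f)) := by
  intro xs
  induction xs with
  | nil => simp [pickA]
  | cons x rest ih => simp [pickA, ih, Function.comp]

lemma permsA_map (f : String → String) :
    ∀ (r : Nat) (xs : List String),
      permsA r (xs.map f) = (permsA r xs).map (List.map f) := by
  intro r
  induction r with
  | zero => intro xs; simp [permsA]
  | succ n ih =>
      intro xs
      simp [permsA, pickA_map, ih, List.flatMap_map, List.map_flatMap, Function.comp_def]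

-- a fold of pointwise appends over skipping contributions is, bucket by bucket, a flatMap
lemma foldl_zipAdd (c : Nat → Bool) (V : Nat → List (List String)) (m : Nat) :
    ∀ (l : List Nat), (∀ j ∈ l, (V j).length = m) →
      ∀ (acc : List (List String)), acc.length = m →
      l.foldl (fun acc j => if c j then acc else zipAddB acc (V j)) acc
        = (List.range m).map (fun d =>
            acc.getD d [] ++ l.flatMap (fun j => if c j then [] else (V j).getD d [])) := by
  intro l
  induction l with
  | nil =>
      intro _ acc hacc
      rw [List.foldl_nil]
      refine List.ext_getElem (by simp [hacc]) ?_
      intro i h1 h2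
      simp only [List.getElem_map, List.getElem_range, List.flatMap_nil, List.append_nil]
      rw [List.getD_eq_getElem acc [] (by simpa using h1)]
  | cons j l ih =>
      intro hV acc hacc
      by_cases hc : c j
      · rw [List.foldl_cons, if_pos hc, ih (fun t ht => hV t (by simp [ht])) acc hacc]
        simp [hc]
      · have hVl : (V j).length = m := hV j (by simp)
        have hacc' : (zipAddB acc (V j)).length = m := by
          simp [zipAddB, hacc, hVl]
        rw [List.foldl_cons, if_neg hc, ih (fun t ht => hV t (by simp [ht])) _ hacc']
        refine List.ext_getElem (by simp) ?_
        intro i h1 h2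
        simp only [List.getElem_map, List.getElem_range]
        have hi : i < m := by simpa using h1
        rw [List.getD_eq_getElem (zipAddB acc (V j)) [] (by omega),
          List.getD_eq_getElem acc [] (by omega)]
        simp only [zipAddB, List.getElem_zipWith]
        rw [List.flatMap_cons, if_neg hc,
          List.getD_eq_getElem (V j) [] (by omega)]
        simp [List.append_assoc]

-- the single DFS with buckets computes, per length d+1, A's permutations of the available pool
lemma goB_eq :
    ∀ (f : Nat) (lowered : List String) (used : List Bool) (pref : String),
      used.length = lowered.length →
      goB lowered used pref f
        = (List.range f).map (fun d =>
            (permsA (d + 1) (avail lowered used)).map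
              (fun p => pref ++ PySem.Str.join "" p)) := by
  intro f
  induction f with
  | zero => intro lowered used pref h; simp [goB]
  | succ f ih =>
      intro lowered used pref h
      have hV : ∀ j ∈ List.range lowered.length,
          ([pref ++ lowered.getD j ""] ::
            goB lowered (used.set j true) (pref ++ lowered.getD j "") f).length = f + 1 := by
        intro j _
        rw [ih lowered (used.set j true) _ (by simp [h])]
        simp
      show (List.range lowered.length).foldl _ _ = _
      rw [foldl_zipAdd (fun j => used.getD j false) _ (f + 1)
        (List.range lowered.length) hV _ (by simp)]
      refine List.ext_getElem (by simp) ?_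
      intro d h1 h2
      simp only [List.getElem_map, List.getElem_range]
      have hd : d < f + 1 := by simpa using h1
      rw [List.getD_replicate _ hd, List.nil_append]
      cases d with
      | zero =>
          have hstep : (fun j =>
              if used.getD j false then []
              else ([pref ++ lowered.getD j ""] ::
                goB lowered (used.set j true) (pref ++ lowered.getD j "") f).getD 0 [])
            = (fun j =>
              if used.getD j false then []
              else (fun (y : String) (_ : List String) => [pref ++ y])
                (lowered.getD j "") (avail lowered (used.set j true))) := by
            funext j
            by_cases hu : used.getD j false
            · rw [if_pos hu, if_pos hu]
            · rw [if_neg hu, if_neg hu, List.getD_cons_zero]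
          rw [hstep, scan_eq lowered used h (fun y _ => [pref ++ y])]
          simp [permsA, List.map_flatMap, strJoin_singleton]
      | succ e =>
          have he : e < f := by omega
          have hstep : (fun j =>
              if used.getD j false then []
              else ([pref ++ lowered.getD j ""] ::
                goB lowered (used.set j true) (pref ++ lowered.getD j "") f).getD (e + 1) [])
            = (fun j =>
              if used.getD j false then []
              else (fun (y : String) (ys : List String) =>
                  (permsA (e + 1) ys).map (fun p => (pref ++ y) ++ PySem.Str.join "" p))
                (lowered.getD j "") (avail lowered (used.set j true))) := by
            funext j
            by_cases hu : used.getD j false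
            · rw [if_pos hu, if_pos hu]
            · rw [if_neg hu, if_neg hu, List.getD_cons_succ,
                ih lowered (used.set j true) _ (by simp [h]),
                List.getD_eq_getElem _ [] (by simpa using he)]
              simp
          rw [hstep, scan_eq lowered used h (fun y ys =>
            (permsA (e + 1) ys).map (fun p => (pref ++ y) ++ PySem.Str.join "" p))]
          simp [permsA, List.map_flatMap, List.map_map, Function.comp_def,
            strJoin_empty_cons, String.append_assoc]

-- ===== VERDICT (by name: the statement is the Claim_ definition above) =====
theorem get_permutations_draw_py_spec : Claim_equal_get_permutations_draw_py := by
  intro draw _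
  unfold Spec_get_permutations_draw_py get_permutations_draw_py get_permutations_draw_py_alt
  rw [goB_eq draw.length (draw.map PySem.Str.lower) (List.replicate draw.length false) ""
      (by simp)]
  have hav : avail (draw.map PySem.Str.lower) (List.replicate draw.length false)
      = draw.map PySem.Str.lower := by
    have := avail_replicate_false (draw.map PySem.Str.lower)
    simpa using this
  rw [hav, PySem.List.pyRange_one]
  have hn : (((draw.length : Int) + 1) - 1).toNat = draw.length := by omega
  rw [hn, List.foldl_map, List.foldl_map]
  have hfun : (fun (result : List String) (k : Nat) =>
      (permsA ((1 : Int) + (k : Int)).toNat draw).foldl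
        (fun result item => result ++ [PySem.Str.lower (PySem.Str.join "" item)]) result)
    = (fun (result : List String) (k : Nat) =>
      result ++ ((permsA (k + 1) (draw.map PySem.Str.lower)).map
        (fun p => "" ++ PySem.Str.join "" p))) := by
    funext result k
    have hk : ((1 : Int) + (k : Int)).toNat = k + 1 := by omega
    rw [hk, foldl_app, permsA_map]
    congr 1
    rw [List.map_map]
    refine List.map_congr_left ?_
    intro item _
    simp [Function.comp, lower_join]
  rw [hfun]
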